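-- pv_equiv track=rewrite | github.com/HEPHZIBAI/70-days-hackerrank-challange | Sherlock and Divisors.py | count_divisors_divisible_by_2
-- ===== SOURCE A (Python) =====
-- import math
--
-- def count_divisors_divisible_by_2(n):
--     count = 0
--     sqrt_n = int(math.sqrt(n))
--
--     for i in range(1, sqrt_n + 1):
--         if n % i == 0:
--             if i % 2 == 0:
--                 count += 1
--             if i != n // i and (n // i) % 2 == 0:
--                 count += 1
--
--     return count
-- ===== SOURCE B (Python) =====
-- import math
--
-- def count_divisors_divisible_by_2(n):
--     if n <= 0:
--         return 0
--     a = 0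
--     while n % 2 == 0:
--         n //= 2
--         a += 1
--     if a == 0:
--         return 0
--     d = 0
--     for i in range(1, int(math.sqrt(n)) + 1):
--         if n % i == 0:
--             d += 1 if i * i == n else 2
--     return a * d
-- ===== Notes on version B (the rewrite author's own statement) =====
-- stated objective: alternative
-- what changed: Instead of scanning every i up to sqrt(n) and testing each of the divisor pair i, n//i for evenness, B factors out the power of two (n = 2**a * b with b odd), short-circuits for odd n, and otherwise counts the divisors of the odd part b by trial division up to its square root, returning a * d(b).
import Mathlib
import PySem

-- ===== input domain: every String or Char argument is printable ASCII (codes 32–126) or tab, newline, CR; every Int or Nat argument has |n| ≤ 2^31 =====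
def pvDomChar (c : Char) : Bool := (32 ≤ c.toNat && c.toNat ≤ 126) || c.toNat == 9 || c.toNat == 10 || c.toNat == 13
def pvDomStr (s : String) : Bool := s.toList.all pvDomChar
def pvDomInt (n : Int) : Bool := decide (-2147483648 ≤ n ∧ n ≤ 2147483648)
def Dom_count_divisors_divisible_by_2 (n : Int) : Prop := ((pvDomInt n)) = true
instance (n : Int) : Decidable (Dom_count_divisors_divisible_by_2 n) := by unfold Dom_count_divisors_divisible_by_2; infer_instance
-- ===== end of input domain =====

-- B factors n = 2^a * b (b odd) and returns a * d(b) (trial division up to sqrt(b)) instead of A's sqrt-paired evenness scan of n (an alternative algorithm with a smaller trial-division bound).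
-- int(math.sqrt(n)) is ported as Nat.sqrt: exact for the domain 0 ≤ n ≤ 2^31 (float sqrt is correctly rounded there).

-- ===== PORT A =====
def count_divisors_divisible_by_2 (n : Int) : Int :=
  let sqrt_n : Int := (Nat.sqrt n.toNat : Int)
  (PySem.List.pyRange 1 (sqrt_n + 1) 1).foldl
    (fun count i =>
      if PySem.Int.mod n i = 0 then
        let count := if PySem.Int.mod i 2 = 0 then count + 1 else count
        if i ≠ PySem.Int.floordiv n i ∧ PySem.Int.mod (PySem.Int.floordiv n i) 2 = 0 then
          count + 1
        else count
      else count) 0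

-- ===== PORT B =====
-- the 'while n % 2 == 0' loop of Source B; 'm ≠ 0' in the guard is only the termination guard (m stays positive on admitted inputs)
def pvOddify (m : Nat) (a : Int) : Int × Nat :=
  if h : m % 2 = 0 ∧ m ≠ 0 then pvOddify (m / 2) (a + 1) else (a, m)
  termination_by m
  decreasing_by exact Nat.div_lt_self (Nat.pos_of_ne_zero h.2) (by omega)

def count_divisors_divisible_by_2_alt (n : Int) : Int :=
  if n ≤ 0 then 0
  else
    let p := pvOddify n.toNat 0
    if p.1 = 0 then 0
    else
      p.1 * ((PySem.List.pyRange 1 ((Nat.sqrt p.2 : Int) + 1) 1).foldl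
        (fun d i =>
          if PySem.Int.mod (p.2 : Int) i = 0 then
            if i * i = (p.2 : Int) then d + 1 else d + 2
          else d) 0)

-- ===== PRECONDITION & SPEC =====
-- Pre_ excludes exactly the negative n, on which A's math.sqrt raises ValueError (math domain error).
def Pre_count_divisors_divisible_by_2 (n : Int) : Prop := 0 ≤ n
instance (n : Int) : Decidable (Pre_count_divisors_divisible_by_2 n) := by unfold Pre_count_divisors_divisible_by_2; infer_instance
def pvWitness_count_divisors_divisible_by_2 : Int := 12

def Spec_count_divisors_divisible_by_2 (n : Int) (out : Int) : Prop := out = count_divisors_divisible_by_2_alt n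
instance (n : Int) (out : Int) : Decidable (Spec_count_divisors_divisible_by_2 n out) := by unfold Spec_count_divisors_divisible_by_2; infer_instance

-- ===== CLAIM (what is proved, stated in full; the proofs are below) =====
def Claim_equal_count_divisors_divisible_by_2 : Prop := ∀ (n : Int), Dom_count_divisors_divisible_by_2 n → Pre_count_divisors_divisible_by_2 n → Spec_count_divisors_divisible_by_2 n (count_divisors_divisible_by_2 n)

-- ===== LEMMAS AND PROOFS =====

-- the common mathematical value: the number of even divisors of m
def evenDivCount (m : Nat) : Nat := (m.divisors.filter (fun d => d % 2 = 0)).card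

theorem oddify_spec (m : Nat) (hm : m ≠ 0) (a : Int) :
    ∃ (k b : Nat), pvOddify m a = (a + (k : Int), b) ∧ m = 2 ^ k * b ∧ b % 2 = 1 := by
  induction m using Nat.strong_induction_on generalizing a with
  | _ m ih =>
    rw [pvOddify]
    by_cases h : m % 2 = 0
    · simp only [h, hm, ne_eq, not_false_eq_true, dite_true, and_self]
      obtain ⟨k, b, hk, hm2, hb⟩ := ih (m/2) (Nat.div_lt_self (Nat.pos_of_ne_zero hm) (by omega)) (by omega) (a+1)
      refine ⟨k+1, b, by rw [hk]; congr 1; push_cast; ring, ?_, hb⟩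
      have h2 : m = 2 * (m / 2) := by omega
      rw [h2, hm2, pow_succ]; ring
    · simp only [h, false_and, dite_false]
      refine ⟨0, m, by simp, by simp, ?_⟩
      omega

theorem odd_dvd_of_dvd_pow2_mul {k b d : Nat} (hd : d % 2 = 1)
    (h : d ∣ 2 ^ k * b) : d ∣ b := by
  have hc : Nat.Coprime d (2 ^ k) := Nat.Coprime.pow_right _ ((Nat.coprime_two_right.mpr (Nat.odd_iff.mpr hd)))
  exact hc.dvd_of_dvd_mul_left h

-- even divisors of 2^k * b (b odd) number k * d(b)
theorem mult_lemma (k b : Nat) (hb : b % 2 = 1) :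
    evenDivCount (2 ^ k * b) = k * b.divisors.card := by
  have hb0 : b ≠ 0 := by omega
  have hn0 : 2 ^ k * b ≠ 0 := by positivity
  have hcop : Nat.Coprime (2 ^ k) b := Nat.Coprime.pow_left _ ((Nat.coprime_two_left.mpr (Nat.odd_iff.mpr hb)))
  have hodd : (2 ^ k * b).divisors.filter (fun d => ¬ d % 2 = 0) = b.divisors := by
    ext d
    simp only [Finset.mem_filter, Nat.mem_divisors]
    constructor
    · rintro ⟨⟨hd, _⟩, ho⟩
      exact ⟨odd_dvd_of_dvd_pow2_mul (by omega) hd, hb0⟩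
    · rintro ⟨hd, _⟩
      have : d % 2 = 1 := by
        rcases Nat.mod_two_eq_zero_or_one d with h | h
        · exfalso
          have : (2 : Nat) ∣ b := dvd_trans (by omega : (2:Nat) ∣ d) hd
          omega
        · exact h
      exact ⟨⟨Dvd.dvd.mul_left hd _, hn0⟩, by omega⟩
  have hsplit := Finset.card_filter_add_card_filter_not
    (s := (2 ^ k * b).divisors) (p := fun d => d % 2 = 0)
  have htot : (2 ^ k * b).divisors.card = (k + 1) * b.divisors.card := by
    rw [hcop.card_divisors_mul]
    congr 1
    rw [Nat.divisors_prime_pow Nat.prime_two]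
    simp
  unfold evenDivCount
  rw [hodd] at hsplit
  have hx : (k + 1) * b.divisors.card = k * b.divisors.card + b.divisors.card := by ring
  omega

-- the sqrt-paired divisor count: summing over i ≤ sqrt m the indicators for the divisor pair (i, m/i)
-- counts each divisor satisfying p exactly once
theorem pairing (m : Nat) (hm : 1 ≤ m) (p : Nat → Prop) [DecidablePred p] :
    (∑ i ∈ Finset.Icc 1 (Nat.sqrt m),
      ((if i ∣ m ∧ p i then 1 else 0) + (if i ∣ m ∧ i ≠ m / i ∧ p (m / i) then 1 else 0)))
      = (m.divisors.filter (fun d => p d)).card := by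
  set s := Nat.sqrt m with hs
  have hss : s * s ≤ m := by have := Nat.sqrt_le' m; nlinarith [sq_nonneg s]
  have hlt : m < (s + 1) * (s + 1) := by have := Nat.lt_succ_sqrt' m; nlinarith
  rw [Finset.sum_add_distrib, ← Finset.card_filter, ← Finset.card_filter]
  have h1 : (Finset.Icc 1 s).filter (fun i => i ∣ m ∧ p i)
      = (m.divisors.filter (fun d => p d)).filter (fun d => d ≤ s) := by
    ext d
    simp only [Finset.mem_filter, Finset.mem_Icc, Nat.mem_divisors]
    constructor
    · rintro ⟨⟨h1, h2⟩, h3, h4⟩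
      exact ⟨⟨⟨h3, by omega⟩, h4⟩, h2⟩
    · rintro ⟨⟨⟨h1, _⟩, h2⟩, h3⟩
      exact ⟨⟨Nat.pos_of_dvd_of_pos h1 (by omega), h3⟩, h1, h2⟩
  have h2 : ((Finset.Icc 1 s).filter (fun i => i ∣ m ∧ i ≠ m / i ∧ p (m / i))).card
      = ((m.divisors.filter (fun d => p d)).filter (fun d => ¬ d ≤ s)).card := by
    apply Finset.card_bij (fun i _ => m / i)
    · rintro i hi
      simp only [Finset.mem_filter, Finset.mem_Icc, Nat.mem_divisors] at hi ⊢
      obtain ⟨⟨hi1, hi2⟩, hdvd, hne, hp⟩ := hi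
      have hmul : i * (m / i) = m := Nat.mul_div_cancel' hdvd
      have hgt : ¬ m / i ≤ s := by
        intro hle
        have h1 : i * (m / i) ≤ s * s := Nat.mul_le_mul hi2 hle
        have heq : i * (m / i) = s * s := by omega
        have : i = m / i := by nlinarith
        exact hne this
      exact ⟨⟨⟨Nat.div_dvd_of_dvd hdvd, by omega⟩, hp⟩, hgt⟩
    · rintro i1 hi1 i2 hi2 heq
      simp only [Finset.mem_filter, Finset.mem_Icc] at hi1 hi2
      have e1 : m / (m / i1) = i1 := Nat.div_div_self hi1.2.1 (by omega)
      have e2 : m / (m / i2) = i2 := Nat.div_div_self hi2.2.1 (by omega)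
      rw [← e1, ← e2, heq]
    · rintro d hd
      simp only [Finset.mem_filter, Nat.mem_divisors] at hd
      obtain ⟨⟨⟨hdvd, _⟩, hp⟩, hgt⟩ := hd
      have hd1 : 1 ≤ d := Nat.pos_of_dvd_of_pos hdvd (by omega)
      have hmd : m / d ∣ m := Nat.div_dvd_of_dvd hdvd
      have he : m / (m / d) = d := Nat.div_div_self hdvd (by omega)
      have hile : m / d ≤ s := by
        have h1 : m / d ≤ m / (s + 1) := Nat.div_le_div_left (by omega) (by omega)
        have h2 : m / (s + 1) < s + 1 := (Nat.div_lt_iff_lt_mul (by omega)).mpr hlt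
        omega
      have hipos : 1 ≤ m / d := Nat.div_pos (Nat.le_of_dvd (by omega) hdvd) (by omega)
      refine ⟨m / d, ?_, he⟩
      simp only [Finset.mem_filter, Finset.mem_Icc]
      exact ⟨⟨hipos, hile⟩, hmd, by omega, by rw [he]; exact hp⟩
  rw [h1, h2]
  exact Finset.card_filter_add_card_filter_not _

theorem sum_shift (s : Nat) (f : Nat → Nat) :
    ∑ i ∈ Finset.Icc 1 s, f i = ∑ k ∈ Finset.range s, f (1+k) := by
  have h : Finset.Icc 1 s = Finset.Ico 1 (s+1) := by
    ext x; simp [Finset.mem_Icc, Finset.mem_Ico]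
  rw [h, Finset.sum_Ico_eq_sum_range]
  simp

def gNat (m i : Nat) : Nat :=
  (if i ∣ m ∧ i % 2 = 0 then 1 else 0) + (if i ∣ m ∧ i ≠ m / i ∧ (m / i) % 2 = 0 then 1 else 0)

theorem gA_cast (m j : Nat) :
    ((if PySem.Int.mod (m : Int) (j : Int) = 0 ∧ PySem.Int.mod (j : Int) 2 = 0 then (1:Int) else 0)
      + (if PySem.Int.mod (m : Int) (j : Int) = 0 ∧ (j : Int) ≠ PySem.Int.floordiv (m : Int) (j : Int)
            ∧ PySem.Int.mod (PySem.Int.floordiv (m : Int) (j : Int)) 2 = 0 then (1:Int) else 0))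
      = (gNat m j : Int) := by
  have hd : PySem.Int.floordiv (m : Int) (j : Int) = ((m / j : Nat) : Int) :=
    PySem.Int.floordiv_natCast m j
  rw [hd]
  have e1 : (PySem.Int.mod (m : Int) (j : Int) = 0 ∧ PySem.Int.mod (j : Int) 2 = 0)
      ↔ (j ∣ m ∧ j % 2 = 0) := by
    rw [PySem.Int.mod_eq_zero_iff_dvd, PySem.Int.mod_eq_zero_iff_dvd]
    constructor
    · rintro ⟨h1, h2⟩
      refine ⟨by exact_mod_cast h1, ?_⟩
      have : (2:Nat) ∣ j := by exact_mod_cast h2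
      omega
    · rintro ⟨h1, h2⟩
      exact ⟨by exact_mod_cast h1, by exact_mod_cast Nat.dvd_of_mod_eq_zero h2⟩
  have e2 : (PySem.Int.mod (m : Int) (j : Int) = 0 ∧ (j : Int) ≠ ((m / j : Nat) : Int)
        ∧ PySem.Int.mod ((m / j : Nat) : Int) 2 = 0)
      ↔ (j ∣ m ∧ j ≠ m / j ∧ (m / j) % 2 = 0) := by
    rw [PySem.Int.mod_eq_zero_iff_dvd, PySem.Int.mod_eq_zero_iff_dvd]
    constructor
    · rintro ⟨h1, h2, h3⟩
      refine ⟨by exact_mod_cast h1, by exact_mod_cast h2, ?_⟩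
      have : (2:Nat) ∣ m / j := by exact_mod_cast h3
      omega
    · rintro ⟨h1, h2, h3⟩
      exact ⟨by exact_mod_cast h1, by exact_mod_cast h2,
        by exact_mod_cast Nat.dvd_of_mod_eq_zero h3⟩
  rw [if_congr e1 rfl rfl, if_congr e2 rfl rfl]
  unfold gNat
  push_cast
  rfl

theorem portA_eq_evenDivCount (m : Nat) (hm : 1 ≤ m) :
    count_divisors_divisible_by_2 (m : Int) = (evenDivCount m : Int) := by
  unfold count_divisors_divisible_by_2
  simp only [Int.toNat_natCast]
  set s := Nat.sqrt m with hs
  rw [PySem.List.foldl_congr_mem _ _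
      (fun (count : Int) i =>
        count + ((if PySem.Int.mod (m : Int) i = 0 ∧ PySem.Int.mod i 2 = 0 then (1:Int) else 0)
          + (if PySem.Int.mod (m : Int) i = 0 ∧ i ≠ PySem.Int.floordiv (m : Int) i
                ∧ PySem.Int.mod (PySem.Int.floordiv (m : Int) i) 2 = 0 then (1:Int) else 0)))
      0
      (by intro acc x _; dsimp only; split_ifs <;> try tauto
          all_goals omega)]
  rw [PySem.List.foldl_add]
  rw [PySem.List.pyRange_one]
  have ht : ((s : Int) + 1 - 1).toNat = s := by omega
  rw [ht, List.map_map]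
  have hsum : ∀ (f : Int → Int), ((List.range s).map (f ∘ fun k => (1:Int) + (k:Nat))).sum
      = ∑ k ∈ Finset.range s, f (1 + (k:Nat)) := by
    intro f; exact Int.neg_inj.mp rfl
  rw [hsum]
  have hpt : ∀ k : Nat, ((if PySem.Int.mod (m : Int) (1 + (k:Int)) = 0 ∧ PySem.Int.mod (1 + (k:Int)) 2 = 0 then (1:Int) else 0)
          + (if PySem.Int.mod (m : Int) (1 + (k:Int)) = 0 ∧ (1 + (k:Int)) ≠ PySem.Int.floordiv (m : Int) (1 + (k:Int))
                ∧ PySem.Int.mod (PySem.Int.floordiv (m : Int) (1 + (k:Int))) 2 = 0 then (1:Int) else 0))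
      = (gNat m (1 + k) : Int) := by
    intro k
    have : (1 + (k:Int)) = ((1 + k : Nat) : Int) := by push_cast; ring
    rw [this, gA_cast]
  calc (0:Int) + ∑ k ∈ Finset.range s, _ = ∑ k ∈ Finset.range s, (gNat m (1+k) : Int) := by
        rw [zero_add]; exact Finset.sum_congr rfl (fun k _ => hpt k)
    _ = ((∑ k ∈ Finset.range s, gNat m (1+k) : Nat) : Int) := by push_cast; rfl
    _ = ((∑ i ∈ Finset.Icc 1 s, gNat m i : Nat) : Int) := by rw [sum_shift]
    _ = (evenDivCount m : Int) := by
        unfold evenDivCount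
        congr 1
        exact pairing m hm (fun d => d % 2 = 0)

theorem gB_cast (b j : Nat) (hj : 1 ≤ j) :
    (if PySem.Int.mod (b : Int) (j : Int) = 0 then
        (if (j : Int) * (j : Int) = (b : Int) then (1:Int) else 2) else 0)
      = (((if j ∣ b ∧ True then 1 else 0) + (if j ∣ b ∧ j ≠ b / j ∧ True then 1 else 0) : Nat) : Int) := by
  by_cases hdvd : j ∣ b
  · have hmod : PySem.Int.mod (b : Int) (j : Int) = 0 :=
      (PySem.Int.mod_eq_zero_iff_dvd _ _).mpr (by exact_mod_cast hdvd)
    have hiff : ((j : Int) * (j : Int) = (b : Int)) ↔ j * j = b := by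
      constructor <;> intro h <;> exact_mod_cast h
    rw [if_pos hmod, if_congr hiff rfl rfl]
    by_cases hsq : j * j = b
    · have hbj : j = b / j := by
        rw [← hsq, Nat.mul_div_cancel_left _ (by omega)]
      rw [if_pos hsq, if_pos ⟨hdvd, trivial⟩, if_neg (by tauto : ¬(j ∣ b ∧ j ≠ b / j ∧ True))]
      norm_num
    · have hbj : j ≠ b / j := by
        intro h
        apply hsq
        conv_rhs => rw [← Nat.div_mul_cancel hdvd]
        rw [← h]
      rw [if_neg hsq, if_pos ⟨hdvd, trivial⟩, if_pos ⟨hdvd, hbj, trivial⟩]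
      norm_num
  · have hmod : ¬ PySem.Int.mod (b : Int) (j : Int) = 0 := by
      rw [PySem.Int.mod_eq_zero_iff_dvd]
      intro h; exact hdvd (by exact_mod_cast h)
    rw [if_neg hmod, if_neg (by tauto : ¬(j ∣ b ∧ True)), if_neg (by tauto : ¬(j ∣ b ∧ j ≠ b / j ∧ True))]
    norm_num

theorem portB_inner (b : Nat) (hb : 1 ≤ b) :
    ((PySem.List.pyRange 1 ((Nat.sqrt b : Int) + 1) 1).foldl
        (fun d i =>
          if PySem.Int.mod (b : Int) i = 0 then
            if i * i = (b : Int) then d + 1 else d + 2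
          else d) 0) = (b.divisors.card : Int) := by
  set s := Nat.sqrt b with hs
  rw [PySem.List.foldl_congr_mem _ _
      (fun (d : Int) i =>
        d + (if PySem.Int.mod (b : Int) i = 0 then
              (if i * i = (b : Int) then (1:Int) else 2) else 0))
      0
      (by intro acc x _; dsimp only; split_ifs <;> omega)]
  rw [PySem.List.foldl_add, PySem.List.pyRange_one]
  have ht : ((s : Int) + 1 - 1).toNat = s := by omega
  rw [ht, List.map_map]
  have hsum : ∀ (f : Int → Int), ((List.range s).map (f ∘ fun k => (1:Int) + (k:Nat))).sum
      = ∑ k ∈ Finset.range s, f (1 + (k:Nat)) := by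
    intro f; exact Int.neg_inj.mp rfl
  rw [hsum, zero_add]
  have hpt : ∀ k : Nat,
      (if PySem.Int.mod (b : Int) (1 + (k:Int)) = 0 then
          (if (1 + (k:Int)) * (1 + (k:Int)) = (b : Int) then (1:Int) else 2) else 0)
      = (((if (1+k) ∣ b ∧ True then 1 else 0) + (if (1+k) ∣ b ∧ (1+k) ≠ b / (1+k) ∧ True then 1 else 0) : Nat) : Int) := by
    intro k
    have hc : (1 + (k:Int)) = ((1 + k : Nat) : Int) := by push_cast; ring
    rw [hc, gB_cast b (1+k) (by omega)]
  calc (∑ k ∈ Finset.range s, _)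
      = ∑ k ∈ Finset.range s, (((if (1+k) ∣ b ∧ True then 1 else 0) + (if (1+k) ∣ b ∧ (1+k) ≠ b / (1+k) ∧ True then 1 else 0) : Nat) : Int) :=
        Finset.sum_congr rfl (fun k _ => hpt k)
    _ = ((∑ k ∈ Finset.range s, ((if (1+k) ∣ b ∧ True then 1 else 0) + (if (1+k) ∣ b ∧ (1+k) ≠ b / (1+k) ∧ True then 1 else 0)) : Nat) : Int) := by
        push_cast; rfl
    _ = (b.divisors.card : Int) := by
        congr 1
        rw [← sum_shift s (fun i => (if i ∣ b ∧ True then 1 else 0) + (if i ∣ b ∧ i ≠ b / i ∧ True then 1 else 0))]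
        rw [pairing b hb (fun _ => True)]
        simp

theorem main_eq (n : Int) (hpre : 0 ≤ n) :
    count_divisors_divisible_by_2 n = count_divisors_divisible_by_2_alt n := by
  obtain ⟨m, rfl⟩ : ∃ m : Nat, n = (m : Int) := ⟨n.toNat, (Int.toNat_of_nonneg hpre).symm⟩
  by_cases hm : m = 0
  · subst hm; decide
  · have hm1 : 1 ≤ m := by omega
    rw [portA_eq_evenDivCount m hm1]
    obtain ⟨k, b, hk, hmb, hb⟩ := oddify_spec m hm 0
    have hb1 : 1 ≤ b := by omega
    have hnle : ¬ ((m : Int) ≤ 0) := by exact_mod_cast Nat.not_le.mpr (by omega : 0 < m)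
    simp only [count_divisors_divisible_by_2_alt, Int.toNat_natCast, hk, zero_add]
    rw [if_neg hnle]
    by_cases hk0 : k = 0
    · subst hk0
      rw [if_pos (by norm_num)]
      rw [hmb, mult_lemma 0 b hb]
      norm_num
    · rw [if_neg (by exact_mod_cast hk0)]
      rw [portB_inner b hb1, hmb, mult_lemma k b hb]
      push_cast; ring

-- ===== VERDICT (by name: the statement is the Claim_ definition above) =====
theorem count_divisors_divisible_by_2_spec : Claim_equal_count_divisors_divisible_by_2 := by
  intro n _ hpre
  unfold Spec_count_divisors_divisible_by_2
  exact main_eq n hpre
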